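-- pv_equiv track=rewrite | github.com/Jenniemilia/Algoritmi_harjoituksia | onechar.py | count
-- ===== SOURCE A (Python) =====
-- def count(s):
--     pituus = len(s)
--     laskuri = 0
--     osajonot = 0
--     for i in range(pituus):
--         if i != 0 and (s[i-1]) == (s[i]):
--             osajonot += 1
--         else:
--             osajonot = 1
--         laskuri += osajonot
--     return laskuri
-- ===== SOURCE B (Python) =====
-- def count(s):
--     # One pass over runs: each maximal run of length L contributes L*(L+1)//2.
--     total = 0
--     run_char = None
--     run_len = 0
--     for ch in s:
--         if ch == run_char:
--             run_len += 1
--         else: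
--             total += run_len * (run_len + 1) // 2
--             run_char = ch
--             run_len = 1
--     total += run_len * (run_len + 1) // 2
--     return total
-- ===== Notes on version B (the rewrite author's own statement) =====
-- stated objective: alternative
-- what changed: Replaces A's per-index running accumulator (re-indexing s[i-1]/s[i] at every step) by a single run-length pass that adds the closed-form triangular count L*(L+1)//2 once per maximal run.
import Mathlib
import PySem

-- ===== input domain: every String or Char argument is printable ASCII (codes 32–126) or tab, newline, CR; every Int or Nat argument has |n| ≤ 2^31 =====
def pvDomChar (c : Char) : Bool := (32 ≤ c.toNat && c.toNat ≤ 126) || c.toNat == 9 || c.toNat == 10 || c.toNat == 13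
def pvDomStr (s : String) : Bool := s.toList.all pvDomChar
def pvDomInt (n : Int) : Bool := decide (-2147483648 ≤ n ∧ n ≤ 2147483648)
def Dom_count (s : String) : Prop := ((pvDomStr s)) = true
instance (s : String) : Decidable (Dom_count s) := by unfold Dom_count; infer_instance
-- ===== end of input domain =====

-- B replaces A's per-index accumulator by a run-length pass adding L*(L+1)//2 per maximal run (same cost, different decomposition).

-- ===== PORT A =====
-- for i in range(pituus): if i != 0 and s[i-1] == s[i]: osajonot += 1 else osajonot = 1; laskuri += osajonot
def countStep (l : List Char) (st : Int × Int) (i : Nat) : Int × Int :=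
  let osajonot := if i ≠ 0 ∧ l[i-1]? = l[i]? then st.2 + 1 else 1
  (st.1 + osajonot, osajonot)

def count (s : String) : Int :=
  ((List.range s.toList.length).foldl (countStep s.toList) (0, 0)).1

-- ===== PORT B =====
-- triangular count of one run: run_len * (run_len + 1) // 2
def triB (L : Nat) : Int := ((L * (L + 1)) / 2 : Nat)

-- loop body: state (total, run_char, run_len)
def altStep (st : Int × Option Char × Nat) (ch : Char) : Int × Option Char × Nat :=
  if some ch = st.2.1 then (st.1, st.2.1, st.2.2 + 1)
  else (st.1 + triB st.2.2, some ch, 1)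

def count_alt (s : String) : Int :=
  let st := s.toList.foldl altStep (0, none, 0)
  st.1 + triB st.2.2

-- ===== PRECONDITION & SPEC =====
def Spec_count (s : String) (out : Int) : Prop := out = count_alt s
instance (s : String) (out : Int) : Decidable (Spec_count s out) := by unfold Spec_count; infer_instance

-- ===== CLAIM (what is proved, stated in full; the proofs are below) =====
def Claim_equal_count : Prop := ∀ (s : String), Dom_count s → Spec_count s (count s)

-- ===== LEMMAS AND PROOFS =====

theorem tri_succ (n : Nat) : triB (n + 1) = triB n + (n + 1 : Nat) := by
  unfold triB
  obtain ⟨k, hk⟩ := Nat.even_mul_succ_self n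
  have h2 : (n + 1) * (n + 1 + 1) = n * (n + 1) + 2 * (n + 1) := by ring
  have h3 : (n + 1) * (n + 1 + 1) / 2 = n * (n + 1) / 2 + (n + 1) := by omega
  rw [h3]; push_cast; ring

theorem main_inv (l : List Char) :
    (List.range l.length).foldl (countStep l) (0, 0) =
      ((l.foldl altStep (0, none, 0)).1 + triB (l.foldl altStep (0, none, 0)).2.2,
       ((l.foldl altStep (0, none, 0)).2.2 : Int)) ∧
    (l.foldl altStep (0, none, 0)).2.1 = l.getLast? := by
  induction l using List.reverseRecOn with
  | nil => simp [triB]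
  | append_singleton t c ih =>
    obtain ⟨ihA, ihC⟩ := ih
    have hlen : (t ++ [c]).length = t.length + 1 := by simp
    have hfold :
        (List.range (t ++ [c]).length).foldl (countStep (t ++ [c])) (0, 0) =
        countStep (t ++ [c]) ((List.range t.length).foldl (countStep t) (0, 0)) t.length := by
      rw [hlen, List.range_succ, List.foldl_append]
      simp only [List.foldl_cons, List.foldl_nil]
      congr 1
      apply PySem.List.foldl_congr_mem
      intro st i hi
      have hi' : i < t.length := List.mem_range.mp hi
      unfold countStep
      have h1 : (t ++ [c])[i]? = t[i]? := List.getElem?_append_left hi'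
      have h2 : (t ++ [c])[i-1]? = t[i-1]? := List.getElem?_append_left (by omega)
      rw [h1, h2]
    rw [hfold, ihA, List.foldl_append]
    set st := t.foldl altStep (0, none, 0) with hst
    have hgetc : (t ++ [c])[t.length]? = some c := by
      simp
    cases t with
    | nil =>
      simp only [hst] at *
      constructor
      · simp [countStep, altStep, triB, List.foldl]
      · simp [altStep, List.foldl]
    | cons h0 t0 =>
      have htne : h0 :: t0 ≠ [] := by simp
      have hgetp : (h0 :: t0 ++ [c])[(h0 :: t0).length - 1]? = (h0 :: t0).getLast? := by
        rw [List.getElem?_append_left (by simp)]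
        exact (List.getLast?_eq_getElem? (l := h0 :: t0)).symm
      by_cases hc : (h0 :: t0).getLast? = some c
      · have hcond : ((h0 :: t0).length ≠ 0 ∧
            (h0 :: t0 ++ [c])[(h0 :: t0).length - 1]? = (h0 :: t0 ++ [c])[(h0 :: t0).length]?) := by
          refine ⟨by simp, ?_⟩
          rw [hgetp, hgetc, hc]
        have hrc : some c = st.2.1 := by rw [ihC, hc]
        constructor
        · simp only [countStep, if_pos hcond, List.foldl_cons, List.foldl_nil, altStep,
            if_pos hrc, tri_succ, Prod.mk.injEq]
          constructor <;> push_cast <;> ring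
        · simp only [List.foldl_cons, List.foldl_nil, altStep, ihC, if_pos hc.symm]
          rw [hc]; exact (List.getLast?_concat).symm
      · have hcond : ¬ ((h0 :: t0).length ≠ 0 ∧
            (h0 :: t0 ++ [c])[(h0 :: t0).length - 1]? = (h0 :: t0 ++ [c])[(h0 :: t0).length]?) := by
          rw [hgetp, hgetc]
          intro h
          exact hc h.2
        have hrc : ¬ some c = st.2.1 := by rw [ihC]; exact fun h => hc h.symm
        constructor
        · simp only [countStep, if_neg hcond, List.foldl_cons, List.foldl_nil, altStep,
            if_neg hrc]
          simp [triB]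
        · simp only [List.foldl_cons, List.foldl_nil, altStep, if_neg hrc]
          exact (List.getLast?_concat).symm

-- ===== VERDICT (by name: the statement is the Claim_ definition above) =====
theorem count_spec : Claim_equal_count := by
  intro s _
  unfold Spec_count count count_alt
  exact congrArg Prod.fst (main_inv s.toList).1
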